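-- pv_equiv track=rewrite | github.com/Chopinsky/algo-problems | challenges/3999/3636-threshold-majority-queries.py | subarrayMajority
-- ===== SOURCE A (Python) =====
-- from typing import List
-- from collections import defaultdict
-- from bisect import bisect_left, bisect_right
--
-- def subarrayMajority(nums: List[int], queries: List[List[int]]) -> List[int]:
--   vals = defaultdict(list)
--   for i, v in enumerate(nums):
--     vals[v].append(i)
--
--   cand = sorted((len(l), v) for v, l in vals.items())
--   ans = []
--
--   for l, r, th in queries:
--     x = bisect_left(cand, (th, -1))
--     if x >= len(cand):
--       ans.append(-1)
--       continue
--
--     curr = (0, 0)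
--     for i in range(len(cand)-1, x-1, -1):
--       cand_info = cand[i]
--       if cand_info[0] < curr[0]:
--         break
--
--       i1 = bisect_right(vals[cand_info[1]], r)
--       i2 = bisect_left(vals[cand_info[1]], l)
--       diff = i1 - i2
--       curr = max(curr, (diff, -cand_info[1]))
--
--       if curr[0] > (r-l+1)//2:
--         break
--
--     if curr[0] >= th:
--       ans.append(-curr[1])
--     else:
--       ans.append(-1)
--
--   return ans
-- ===== SOURCE B (Python) =====
-- def subarrayMajority(nums, queries):
--     ans = []
--     for l, r, th in queries:
--         cnt = {}
--         for i, v in enumerate(nums):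
--             if l <= i <= r:
--                 cnt[v] = cnt.get(v, 0) + 1
--         best_c, best_v = 0, -1
--         for v, c in cnt.items():
--             if c > best_c or (c == best_c and v < best_v):
--                 best_c, best_v = c, v
--         ans.append(best_v if best_c >= th else -1)
--     return ans
-- ===== Notes on version B (the rewrite author's own statement) =====
-- stated objective: simpler
-- what changed: B answers each query by one direct scan of nums building a frequency dict and picking the max-count / smallest-value entry, instead of A's precomputed per-value position lists, globally sorted (count,value) candidate list, bisect threshold cut and pruned descending scan with binary searches.
-- intended difference: On queries whose threshold is <= 0 with a range that misses the array A's (0,0) sentinel leaks (it returns min(0, a scanned value) instead of -1), and on queries where a value <= -2 with total count equal to th wins the window, A's bisect key (th,-1) drops that value and returns -1 or a larger value; B returns the intended mode-with-threshold answer in both cases. — e.g. on subarrayMajority([-5], [[0, 0, 1]]): A returns [-1], B returns [-5]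
import Mathlib
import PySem

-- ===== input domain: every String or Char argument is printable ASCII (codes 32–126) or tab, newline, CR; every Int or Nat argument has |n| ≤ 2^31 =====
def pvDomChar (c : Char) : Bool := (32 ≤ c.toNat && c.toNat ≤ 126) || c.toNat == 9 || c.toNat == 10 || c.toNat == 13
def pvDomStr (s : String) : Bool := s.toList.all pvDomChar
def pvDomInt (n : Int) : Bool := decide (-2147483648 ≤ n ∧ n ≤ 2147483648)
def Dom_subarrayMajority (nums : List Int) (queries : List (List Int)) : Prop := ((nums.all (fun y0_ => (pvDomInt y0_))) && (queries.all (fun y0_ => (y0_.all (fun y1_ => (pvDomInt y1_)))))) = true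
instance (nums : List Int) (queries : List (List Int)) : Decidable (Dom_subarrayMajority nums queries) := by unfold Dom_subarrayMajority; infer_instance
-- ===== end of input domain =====

-- B re-implements the range threshold-majority queries by direct per-query counting
-- (one scan + a dict per query, no position index / binary search / candidate pruning): simpler, not faster.

-- ===== PORT A =====

-- Python tuple comparison (a1, a2) < (b1, b2): lexicographic.
def pvLexLt (a b : Int × Int) : Bool := decide (a.1 < b.1 ∨ (a.1 = b.1 ∧ a.2 < b.2))

-- Python max(a, b) on two tuples: returns b exactly when b > a.
def pvMax2 (a b : Int × Int) : Int × Int := if pvLexLt a b then b else a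

-- bisect_left(cand, key) on the lex-sorted list cand: Python returns the insertion
-- point, i.e. the number of entries lexicographically below key (exact on sorted input).
def pvBisectPair (xs : List (Int × Int)) (key : Int × Int) : Nat :=
  xs.countP (fun e => pvLexLt e key)

-- 'vals = defaultdict(list); for i, v in enumerate(nums): vals[v].append(i)'
def pvVals (nums : List Int) : PySem.Dict Int (List Int) :=
  (PySem.List.enumerate nums 0).foldl
    (fun d p => d.modify p.2 [] (fun ps => ps ++ [p.1])) PySem.Dict.empty

-- 'cand = sorted((len(l), v) for v, l in vals.items())'
def pvCand (nums : List Int) : List (Int × Int) :=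
  PySem.List.sorted2 ((pvVals nums).items.map (fun p => ((p.2.length : Int), p.1)))
    (fun e => e.1) (fun e => e.2) false

-- the inner 'for i in range(len(cand)-1, x-1, -1)' loop with its two breaks,
-- as structural recursion over the reversed suffix of cand
def pvScanA (vals : PySem.Dict Int (List Int)) (l r : Int) :
    List (Int × Int) → (Int × Int) → (Int × Int)
  | [], curr => curr
  | c :: rest, curr =>
    if c.1 < curr.1 then curr
    else
      let ps := vals.getD c.2 []
      let i1 := PySem.List.bisectRight ps r
      let i2 := PySem.List.bisectLeft ps l
      let diff : Int := (i1 : Int) - (i2 : Int)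
      let curr' := pvMax2 curr (diff, -c.2)
      if PySem.Int.floordiv (r - l + 1) 2 < curr'.1 then curr'
      else pvScanA vals l r rest curr'

-- the body of 'for l, r, th in queries' (a non-3-element query raises ValueError in Python: outside Pre_)
def pvAnsA (vals : PySem.Dict Int (List Int)) (cand : List (Int × Int)) (q : List Int) : Int :=
  match q with
  | [l, r, th] =>
    let x := pvBisectPair cand (th, -1)
    if cand.length ≤ x then -1
    else
      let curr := pvScanA vals l r ((cand.drop x).reverse) (0, 0)
      if th ≤ curr.1 then -curr.2 else -1
  | _ => -1

def subarrayMajority (nums : List Int) (queries : List (List Int)) : List Int :=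
  queries.foldl (fun ans q => ans ++ [pvAnsA (pvVals nums) (pvCand nums) q]) []

-- ===== PORT B =====

-- the body of B's 'for l, r, th in queries' (same ValueError convention outside Pre_)
def pvAnsB (nums : List Int) (q : List Int) : Int :=
  match q with
  | [l, r, th] =>
    let cnt := (PySem.List.enumerate nums 0).foldl
      (fun c p => if l ≤ p.1 ∧ p.1 ≤ r then c.insert p.2 (c.getD p.2 0 + 1) else c)
      PySem.Dict.empty
    let best := cnt.items.foldl
      (fun b p => if b.1 < p.2 ∨ (p.2 = b.1 ∧ p.1 < b.2) then (p.2, p.1) else b)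
      ((0 : Int), (-1 : Int))
    if th ≤ best.1 then best.2 else -1
  | _ => -1

def subarrayMajority_alt (nums : List Int) (queries : List (List Int)) : List Int :=
  queries.foldl (fun ans q => ans ++ [pvAnsB nums q]) []

-- ===== PRECONDITION & SPEC =====

-- Pre_ excludes exactly the inputs on which Python raises: a query list that does not
-- unpack as 'l, r, th' (length ≠ 3) is a ValueError in both A and B.
def Pre_subarrayMajority (nums : List Int) (queries : List (List Int)) : Prop :=
  ∀ q ∈ queries, q.length = 3

instance (nums : List Int) (queries : List (List Int)) : Decidable (Pre_subarrayMajority nums queries) := by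
  unfold Pre_subarrayMajority; infer_instance

def pvWitness_subarrayMajority : List Int × List (List Int) := ([1, 1, 2], [[0, 2, 2]])

-- A was written for the LeetCode constraints nums[i] ≥ 1, threshold ≥ 1: on a query whose
-- threshold is ≤ 0 and whose range misses the array, A's (0,0) sentinel leaks (it returns
-- min(0, a scanned value) instead of -1), and its bisect key (th,-1) silently drops any
-- value ≤ -2 whose total count equals th, so a true winner is replaced by -1 or a larger
-- value; B returns the intended mode-with-threshold answer on those queries.
def D_subarrayMajority (nums : List Int) (queries : List (List Int)) : Prop :=
  ∃ q ∈ queries,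
    let w := (nums.take (q.getD 1 0 + 1).toNat).drop (q.getD 0 0).toNat
    let th := q.getD 2 0
    (th ≤ 0 ∧ w = []) ∨ ∃ v ∈ nums, v ≤ -2 ∧ nums.count v = th.toNat ∧ w.count v = th.toNat

instance (nums : List Int) (queries : List (List Int)) : Decidable (D_subarrayMajority nums queries) := by
  unfold D_subarrayMajority; infer_instance

def Spec_subarrayMajority (nums : List Int) (queries : List (List Int)) (out : List Int) : Prop :=
  ¬ D_subarrayMajority nums queries → out = subarrayMajority_alt nums queries

instance (nums : List Int) (queries : List (List Int)) (out : List Int) : Decidable (Spec_subarrayMajority nums queries out) := by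
  unfold Spec_subarrayMajority; infer_instance

def pvDiffWitness_subarrayMajority : List Int × List (List Int) := ([-5], [[0, 0, 1]])

def pvDiffWitnessOut_subarrayMajority : (List Int) × (List Int) := ([-1], [-5])

-- ===== CLAIM (what is proved, stated in full; the proofs are below) =====

def Claim_unchanged_subarrayMajority : Prop := ∀ (nums : List Int) (queries : List (List Int)), Dom_subarrayMajority nums queries → Pre_subarrayMajority nums queries → Spec_subarrayMajority nums queries (subarrayMajority nums queries)

def Claim_changed_subarrayMajority : Prop := Dom_subarrayMajority (pvDiffWitness_subarrayMajority.1) (pvDiffWitness_subarrayMajority.2) ∧ Pre_subarrayMajority (pvDiffWitness_subarrayMajority.1) (pvDiffWitness_subarrayMajority.2) ∧ D_subarrayMajority (pvDiffWitness_subarrayMajority.1) (pvDiffWitness_subarrayMajority.2) ∧ subarrayMajority (pvDiffWitness_subarrayMajority.1) (pvDiffWitness_subarrayMajority.2) = pvDiffWitnessOut_subarrayMajority.1 ∧ subarrayMajority_alt (pvDiffWitness_subarrayMajority.1) (pvDiffWitness_subarrayMajority.2) = pvDiffWitnessOut_subarrayMajority.2 ∧ pvDiffWitnessOut_subarrayMajority.1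 ≠ pvDiffWitnessOut_subarrayMajority.2

-- ===== LEMMAS AND PROOFS =====

-- number of positions i with l ≤ i ≤ r and nums[i] = v (a plain count over the input)
def pvWCount (nums : List Int) (l r v : Int) : Int :=
  ((PySem.List.enumerate nums 0).countP (fun p => decide (l ≤ p.1 ∧ p.1 ≤ r ∧ p.2 = v)) : Int)

-- ---------- basic facts about the lexicographic order on Int × Int ----------

lemma pvLexLt_true_iff (a b : Int × Int) :
    pvLexLt a b = true ↔ (a.1 < b.1 ∨ (a.1 = b.1 ∧ a.2 < b.2)) := by
  simp [pvLexLt]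

lemma pvLexLt_false_iff (a b : Int × Int) :
    pvLexLt a b = false ↔ (b.1 < a.1 ∨ (b.1 = a.1 ∧ b.2 ≤ a.2)) := by
  simp [pvLexLt]; omega

lemma pvLex_antisymm {a b : Int × Int}
    (h1 : pvLexLt a b = false) (h2 : pvLexLt b a = false) : a = b := by
  rw [pvLexLt_false_iff] at h1 h2
  have : a.1 = b.1 ∧ a.2 = b.2 := by omega
  exact Prod.ext this.1 this.2

lemma pvMax2_eq_or (a b : Int × Int) : pvMax2 a b = a ∨ pvMax2 a b = b := by
  unfold pvMax2; split <;> simp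

lemma pvMax2_of_lt_false {a b : Int × Int} (h : pvLexLt a b = false) : pvMax2 a b = a := by
  unfold pvMax2; simp [h]

-- ---------- characterisation of a running lexicographic max ----------

lemma pvFoldMax_char {α : Type} (g : α → Int × Int) :
    ∀ (es : List α) (init : Int × Int),
      ((es.foldl (fun acc e => pvMax2 acc (g e)) init) = init ∨
        ∃ e ∈ es, (es.foldl (fun acc e => pvMax2 acc (g e)) init) = g e) ∧
      pvLexLt (es.foldl (fun acc e => pvMax2 acc (g e)) init) init = false ∧
      ∀ e ∈ es, pvLexLt (es.foldl (fun acc e => pvMax2 acc (g e)) init) (g e) = false := by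
  intro es
  induction es with
  | nil =>
    intro init
    refine ⟨Or.inl rfl, ?_, by simp⟩
    simp only [List.foldl_nil]
    rw [pvLexLt_false_iff]; omega
  | cons c rest ih =>
    intro init
    simp only [List.foldl_cons]
    obtain ⟨hmem, hinit, hall⟩ := ih (pvMax2 init (g c))
    have hcases := pvMax2_eq_or init (g c)
    have hge_init : pvLexLt (pvMax2 init (g c)) init = false := by
      unfold pvMax2; split
      · rename_i h; rw [pvLexLt_true_iff] at h; rw [pvLexLt_false_iff]; omega
      · rw [pvLexLt_false_iff]; omega
    have hge_c : pvLexLt (pvMax2 init (g c)) (g c) = false := by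
      unfold pvMax2; split
      · rw [pvLexLt_false_iff]; omega
      · rename_i h
        simp only [Bool.not_eq_true] at h
        exact h
    have htrans : ∀ x y z : Int × Int, pvLexLt x y = false → pvLexLt y z = false → pvLexLt x z = false := by
      intro x y z h1 h2; rw [pvLexLt_false_iff] at *; omega
    refine ⟨?_, htrans _ _ _ hinit hge_init, ?_⟩
    · rcases hmem with h | ⟨e, he, hres⟩
      · rcases hcases with h' | h'
        · exact Or.inl (h.trans h')
        · exact Or.inr ⟨c, List.mem_cons_self, h.trans h'⟩
      · exact Or.inr ⟨e, List.mem_cons_of_mem _ he, hres⟩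
    · intro e he
      rcases List.mem_cons.mp he with rfl | he'
      · exact htrans _ _ _ hinit hge_c
      · exact hall e he'

lemma pvFoldMax_stay {α : Type} (g : α → Int × Int) :
    ∀ (es : List α) (curr : Int × Int), (∀ e ∈ es, (g e).1 < curr.1) →
      es.foldl (fun acc e => pvMax2 acc (g e)) curr = curr := by
  intro es
  induction es with
  | nil => intro curr _; rfl
  | cons c rest ih =>
    intro curr h
    simp only [List.foldl_cons]
    have hc : pvLexLt curr (g c) = false := by
      rw [pvLexLt_false_iff]
      have := h c List.mem_cons_self; omega
    rw [pvMax2_of_lt_false hc]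
    exact ih curr (fun e he => h e (List.mem_cons_of_mem _ he))

-- ---------- counting helpers ----------

lemma pvCountP_of_cut {α : Type} (p : α → Bool) :
    ∀ (xs : List α) (cut : Nat), cut ≤ xs.length →
      (∀ j (hj : j < xs.length), j < cut → p xs[j] = true) →
      (∀ j (hj : j < xs.length), cut ≤ j → p xs[j] = false) →
      xs.countP p = cut := by
  intro xs
  induction xs with
  | nil =>
    intro cut h _ _
    have : cut = 0 := Nat.le_zero.mp (by simpa using h)
    simp [this]
  | cons a xs ih =>
    intro cut hle hlt hge
    cases cut with
    | zero =>
      have h0 : p a = false := hge 0 (by simp) (Nat.zero_le _)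
      have hxs : xs.countP p = 0 := by
        apply List.countP_eq_zero.mpr
        intro x hx
        obtain ⟨j, hj, rfl⟩ := List.mem_iff_getElem.mp hx
        have := hge (j + 1) (by simpa using Nat.succ_lt_succ hj) (Nat.zero_le _)
        simpa using this
      rw [List.countP_cons_of_neg (by simp [h0])]
      exact hxs
    | succ k =>
      have h0 : p a = true := hlt 0 (by simp) (Nat.succ_pos _)
      have hxs : xs.countP p = k := by
        apply ih k (by simpa using Nat.succ_le_succ_iff.mp hle)
        · intro j hj hjk
          have := hlt (j + 1) (by simpa using Nat.succ_lt_succ hj) (Nat.succ_lt_succ hjk)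
          simpa using this
        · intro j hj hjk
          have := hge (j + 1) (by simpa using Nat.succ_lt_succ hj) (Nat.succ_le_succ hjk)
          simpa using this
      rw [List.countP_cons_of_pos (by simp [h0])]
      omega

lemma pvBisectLeft_eq_countP (xs : List Int) (x : Int)
    (hs : xs.Pairwise (· ≤ ·)) :
    PySem.List.bisectLeft xs x = xs.countP (fun y => decide (y < x)) := by
  obtain ⟨hle, hlt, hge⟩ := PySem.List.bisectLeft_spec xs x hs
  symm
  apply pvCountP_of_cut _ xs _ hle
  · intro j hj hjc; simpa using hlt j hj hjc
  · intro j hj hjc; simpa using not_lt.mpr (hge j hj hjc)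

lemma pvBisectRight_eq_countP (xs : List Int) (x : Int)
    (hs : xs.Pairwise (· ≤ ·)) :
    PySem.List.bisectRight xs x = xs.countP (fun y => decide (y ≤ x)) := by
  obtain ⟨hle, hlt, hge⟩ := PySem.List.bisectRight_spec xs x hs
  symm
  apply pvCountP_of_cut _ xs _ hle
  · intro j hj hjc; simpa using hlt j hj hjc
  · intro j hj hjc; simpa using not_le.mpr (hge j hj hjc)

lemma pvCountP_interval (l r : Int) (h : l ≤ r + 1) :
    ∀ ps : List Int,
      (ps.countP (fun y => decide (y ≤ r)) : Int) - (ps.countP (fun y => decide (y < l)) : Int)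
        = (ps.countP (fun y => decide (l ≤ y ∧ y ≤ r)) : Int) := by
  intro ps
  induction ps with
  | nil => simp
  | cons a ps ih =>
    by_cases h1 : a ≤ r <;> by_cases h2 : a < l
    · rw [List.countP_cons_of_pos (p := fun y => decide (y ≤ r)) (by simpa using h1),
        List.countP_cons_of_pos (p := fun y => decide (y < l)) (by simpa using h2),
        List.countP_cons_of_neg (p := fun y => decide (l ≤ y ∧ y ≤ r)) (by simp; omega)]
      push_cast; omega
    · rw [List.countP_cons_of_pos (p := fun y => decide (y ≤ r)) (by simpa using h1),
        List.countP_cons_of_neg (p := fun y => decide (y < l)) (by simpa using h2),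
        List.countP_cons_of_pos (p := fun y => decide (l ≤ y ∧ y ≤ r)) (by simp; omega)]
      push_cast; omega
    · exfalso; omega
    · rw [List.countP_cons_of_neg (p := fun y => decide (y ≤ r)) (by simpa using h1),
        List.countP_cons_of_neg (p := fun y => decide (y < l)) (by simpa using h2),
        List.countP_cons_of_neg (p := fun y => decide (l ≤ y ∧ y ≤ r)) (by simp; omega)]
      push_cast; omega

-- ---------- per-input abbreviations (proof-side) ----------

def pvPos (nums : List Int) (v : Int) : List Int :=
  ((PySem.List.enumerate nums 0).filter (fun p => p.2 == v)).map (fun p => p.1)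

def pvTot (nums : List Int) (v : Int) : Int := (nums.count v : Int)

def pvDv (nums : List Int) (l r v : Int) : Int :=
  (PySem.List.bisectRight (pvPos nums v) r : Int) - (PySem.List.bisectLeft (pvPos nums v) l : Int)

def pvWv (nums : List Int) (l r : Int) : List Int :=
  ((PySem.List.enumerate nums 0).filter (fun p => decide (l ≤ p.1 ∧ p.1 ≤ r))).map (fun p => p.2)

-- ---------- structure of vals / cand ----------

lemma pvVals_getD (nums : List Int) (v : Int) :
    (pvVals nums).getD v [] = pvPos nums v := by
  have h := PySem.Dict.getD_foldl_modify_append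
      ((PySem.List.enumerate nums 0).map Prod.swap) PySem.Dict.empty v
  rw [List.foldl_map] at h
  simp only [Prod.fst_swap, Prod.snd_swap, List.filter_map, List.map_map] at h
  unfold pvVals pvPos
  rw [h]
  simp [Function.comp_def]

lemma pvVals_keys (nums : List Int) :
    (pvVals nums).keys = PySem.Set.ofList nums := by
  have h1 : (pvVals nums).keys
      = PySem.Set.update PySem.Dict.empty.keys ((PySem.List.enumerate nums 0).map (fun p => p.2)) :=
    PySem.Dict.keys_foldl_modify_key (PySem.List.enumerate nums 0) (fun p => p.2) []
      (fun _ p ps => ps ++ [p.1]) PySem.Dict.empty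
  rw [h1, PySem.List.map_snd_enumerate, PySem.Dict.keys_empty]
  exact PySem.Set.update_nil_left nums

lemma pvVals_nodup_keys (nums : List Int) : (pvVals nums).keys.Nodup := by
  rw [pvVals_keys]; exact PySem.Set.nodup_ofList nums

lemma pvPos_length (nums : List Int) (v : Int) :
    ((pvPos nums v).length : Int) = pvTot nums v := by
  unfold pvPos pvTot
  rw [List.length_map, ← List.countP_eq_length_filter]
  congr 1
  rw [show (fun p : Int × Int => p.2 == v) = (fun y => y == v) ∘ (fun p : Int × Int => p.2) from rfl,
    ← List.countP_map, PySem.List.map_snd_enumerate]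
  simp [List.count]

lemma pvPos_sorted (nums : List Int) (v : Int) :
    (pvPos nums v).Pairwise (· ≤ ·) := by
  unfold pvPos
  apply List.Pairwise.map (R := fun p q : Int × Int => p.1 < q.1)
  · intro a b h; exact le_of_lt h
  · exact (PySem.List.pairwise_lt_enumerate nums 0).filter _

lemma pvPos_countP_window (nums : List Int) (l r v : Int) :
    ((pvPos nums v).countP (fun y => decide (l ≤ y ∧ y ≤ r)) : Int) = pvWCount nums l r v := by
  unfold pvPos pvWCount
  rw [List.countP_map, List.countP_filter]
  congr 2
  funext p
  simp only [Function.comp]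
  by_cases h1 : l ≤ p.1 ∧ p.1 ≤ r <;> by_cases h2 : p.2 = v <;> simp [h1, h2]

lemma pvDv_eq_wc (nums : List Int) (l r v : Int) (h : l ≤ r + 1) :
    pvDv nums l r v = pvWCount nums l r v := by
  unfold pvDv
  rw [pvBisectRight_eq_countP _ _ (pvPos_sorted nums v),
    pvBisectLeft_eq_countP _ _ (pvPos_sorted nums v)]
  rw [pvCountP_interval l r h (pvPos nums v)]
  exact pvPos_countP_window nums l r v

lemma pvDv_nonpos (nums : List Int) (l r v : Int) (h : r + 1 < l) :
    pvDv nums l r v ≤ 0 := by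
  unfold pvDv
  rw [pvBisectRight_eq_countP _ _ (pvPos_sorted nums v),
    pvBisectLeft_eq_countP _ _ (pvPos_sorted nums v)]
  have h2 : ((pvPos nums v).countP (fun y => decide (y ≤ r)) : Int)
      ≤ ((pvPos nums v).countP (fun y => decide (y < l)) : Int) := by
    exact_mod_cast List.countP_mono_left (by intro a _ ha; simp at ha ⊢; omega)
  omega

lemma pvWCount_nonneg (nums : List Int) (l r v : Int) : 0 ≤ pvWCount nums l r v := by
  unfold pvWCount; positivity

lemma pvWCount_le_tot (nums : List Int) (l r v : Int) :
    pvWCount nums l r v ≤ pvTot nums v := by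
  rw [← pvPos_countP_window nums l r v, ← pvPos_length nums v]
  exact_mod_cast List.countP_le_length

-- ---------- cand as the sorted list of (total count, value) over distinct values ----------

lemma pvCand_eq (nums : List Int) :
    pvCand nums = PySem.List.sorted2
      ((PySem.Set.ofList nums).map (fun v => (pvTot nums v, v)))
      (fun e => e.1) (fun e => e.2) false := by
  unfold pvCand
  congr 1
  rw [PySem.Dict.items_eq_map_keys (pvVals nums) (pvVals_nodup_keys nums) []]
  rw [List.map_map, pvVals_keys]
  apply List.map_congr_left
  intro v _
  simp only [Function.comp]
  rw [pvVals_getD, pvPos_length]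

lemma pvMem_cand (nums : List Int) (e : Int × Int) :
    e ∈ pvCand nums ↔ ∃ v, v ∈ nums ∧ e = (pvTot nums v, v) := by
  rw [pvCand_eq]
  constructor
  · intro h
    have := (PySem.List.sorted2_perm _ _ _ _).mem_iff.mp h
    obtain ⟨v, hv, rfl⟩ := List.mem_map.mp this
    exact ⟨v, (PySem.Set.mem_ofList nums v).mp hv, rfl⟩
  · rintro ⟨v, hv, rfl⟩
    apply (PySem.List.sorted2_perm _ _ _ _).mem_iff.mpr
    exact List.mem_map.mpr ⟨v, (PySem.Set.mem_ofList nums v).mpr hv, rfl⟩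

lemma pvCand_pairwise (nums : List Int) :
    (pvCand nums).Pairwise (fun a b => pvLexLt b a = false) := by
  have key : ∀ (xs : List (Int × Int)),
      (PySem.List.sorted2 xs (fun e => e.1) (fun e => e.2) false).Pairwise
        (fun a b => (fun e : Int × Int => toLex e) a ≤ (fun e : Int × Int => toLex e) b) := by
    intro xs
    unfold PySem.List.sorted2
    simp only
    have hcomp : (fun (a b : Int × Int) =>
        (decide (a.1 < b.1) || (!decide (b.1 < a.1) && decide (a.2 < b.2))))
        = fun a b => decide ((fun e : Int × Int => toLex e) a < (fun e : Int × Int => toLex e) b) := by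
      funext a b
      simp only [Prod.Lex.lt_iff, ofLex_toLex]
      rcases lt_trichotomy a.1 b.1 with h | h | h
      · simp [h]
      · simp [h, lt_irrefl]
      · simp [show ¬ a.1 < b.1 by omega, h, show a.1 ≠ b.1 by omega]
    rw [hcomp]
    have hgen : ∀ (l : List (Int × Int)) (acc : List (Int × Int)),
        acc.Pairwise (fun a b => (fun e : Int × Int => toLex e) a ≤ (fun e : Int × Int => toLex e) b) →
        (l.foldl (fun acc x => PySem.List.insertBy
            (fun a b => decide ((fun e : Int × Int => toLex e) a < (fun e : Int × Int => toLex e) b)) x acc) acc).Pairwise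
          (fun a b => (fun e : Int × Int => toLex e) a ≤ (fun e : Int × Int => toLex e) b) := by
      intro l
      induction l with
      | nil => intro acc h; exact h
      | cons x l ih =>
        intro acc h
        exact ih _ (PySem.List.insertBy_pairwise_le (fun e : Int × Int => toLex e) x acc h)
    exact hgen xs [] List.Pairwise.nil
  have h := key ((PySem.Set.ofList nums).map (fun v => (pvTot nums v, v)))
  rw [← pvCand_eq] at h
  apply h.imp
  intro a b hab
  rw [Prod.Lex.le_iff] at hab
  rw [pvLexLt_false_iff]
  simpa using hab

lemma pvCand_vals_nodup (nums : List Int) : ((pvCand nums).map (fun e => e.2)).Nodup := by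
  have hperm : (pvCand nums).Perm ((PySem.Set.ofList nums).map (fun v => (pvTot nums v, v))) := by
    rw [pvCand_eq]; exact PySem.List.sorted2_perm _ _ _ _
  apply (hperm.map (fun e : Int × Int => e.2)).nodup_iff.mpr
  rw [List.map_map]
  have h2 : ((fun e : Int × Int => e.2) ∘ fun v => (pvTot nums v, v)) = id := rfl
  rw [h2, List.map_id]
  exact PySem.Set.nodup_ofList nums

-- ---------- take/drop of a lex-sorted list at the bisect point ----------

lemma pvSorted_split (key : Int × Int) :
    ∀ s : List (Int × Int), s.Pairwise (fun a b => pvLexLt b a = false) →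
      (∀ e ∈ s.take (s.countP (fun e => pvLexLt e key)), pvLexLt e key = true) ∧
      (∀ e ∈ s.drop (s.countP (fun e => pvLexLt e key)), pvLexLt e key = false) := by
  intro s
  induction s with
  | nil => intro _; simp
  | cons a s ih =>
    intro hp
    rw [List.pairwise_cons] at hp
    obtain ⟨ha, hs⟩ := hp
    by_cases h : pvLexLt a key = true
    · obtain ⟨ht, hd⟩ := ih hs
      rw [List.countP_cons_of_pos (by simpa using h)]
      constructor
      · intro e he
        rw [List.take_succ_cons] at he
        rcases List.mem_cons.mp he with rfl | he'
        · exact h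
        · exact ht e he'
      · intro e he
        rw [List.drop_succ_cons] at he
        exact hd e he
    · have h' : pvLexLt a key = false := Bool.eq_false_iff.mpr h
      have hall : ∀ e ∈ s, pvLexLt e key = false := by
        intro e he
        have h1 := ha e he
        rw [pvLexLt_false_iff] at h1 h' ⊢
        omega
      have hcnt0 : (a :: s).countP (fun e => pvLexLt e key) = 0 := by
        rw [List.countP_cons_of_neg (by simpa using h')]
        exact List.countP_eq_zero.mpr (by intro e he; simpa using hall e he)
      rw [hcnt0]
      constructor
      · intro e he
        rw [List.take_zero] at he
        exact absurd he (List.not_mem_nil)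
      · intro e he
        rw [List.drop_zero] at he
        rcases List.mem_cons.mp he with rfl | he'
        · exact h'
        · exact hall e he'

lemma pvMem_drop_of_not_lt (key : Int × Int) (s : List (Int × Int))
    (hp : s.Pairwise (fun a b => pvLexLt b a = false))
    (e : Int × Int) (he : e ∈ s) (hlt : pvLexLt e key = false) :
    e ∈ s.drop (s.countP (fun e => pvLexLt e key)) := by
  obtain ⟨ht, _⟩ := pvSorted_split key s hp
  rw [← List.take_append_drop (s.countP (fun e => pvLexLt e key)) s] at he
  rcases List.mem_append.mp he with h | h
  · exact absurd (ht e h) (by simp [hlt])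
  · exact h

-- ---------- the scan loop computes the running max (under l ≤ r + 1) ----------

lemma pvScanA_eq_foldl (nums : List Int) (l r : Int) (hlr : l ≤ r + 1)
    (H2 : ∀ u w : Int, u ≠ w → pvDv nums l r u + pvDv nums l r w ≤ r - l + 1) :
    ∀ (es : List (Int × Int)) (curr : Int × Int),
      es.Pairwise (fun a b => b.1 ≤ a.1) →
      ((es.map (fun e => e.2)).Nodup) →
      (∀ e ∈ es, pvDv nums l r e.2 ≤ e.1 ∧ 0 ≤ e.1) →
      (curr = (0, 0) ∨ ∃ v', curr = (pvDv nums l r v', -v') ∧ v' ∉ es.map (fun e => e.2)) →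
      pvScanA (pvVals nums) l r es curr
        = es.foldl (fun acc e => pvMax2 acc (pvDv nums l r e.2, -e.2)) curr := by
  intro es
  induction es with
  | nil => intro curr _ _ _ _; rfl
  | cons c rest ih =>
    intro curr hpw hnd hde hcur
    have hpw' := (List.pairwise_cons.mp hpw).2
    have hhead := (List.pairwise_cons.mp hpw).1
    have hnd2 : (c.2 :: rest.map (fun e => e.2)).Nodup := by simpa using hnd
    have hc2rest : c.2 ∉ rest.map (fun e => e.2) := (List.nodup_cons.mp hnd2).1
    have hnd' := (List.nodup_cons.mp hnd2).2
    simp only [pvScanA]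
    rw [pvVals_getD]
    simp only [show ((PySem.List.bisectRight (pvPos nums c.2) r : Int)
        - (PySem.List.bisectLeft (pvPos nums c.2) l : Int)) = pvDv nums l r c.2 from rfl]
    by_cases hbr : c.1 < curr.1
    · rw [if_pos hbr]
      symm
      apply pvFoldMax_stay
      intro e he
      rcases List.mem_cons.mp he with rfl | he'
      · have := (hde e (List.mem_cons_self)).1; simp only; omega
      · have h1 := (hde e (List.mem_cons_of_mem _ he')).1
        have h2 := hhead e he'
        simp only; omega
    · rw [if_neg hbr]
      simp only [List.foldl_cons]
      have hcur' : pvMax2 curr (pvDv nums l r c.2, -c.2) = (0, 0) ∨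
          ∃ v', pvMax2 curr (pvDv nums l r c.2, -c.2) = (pvDv nums l r v', -v')
            ∧ v' ∉ rest.map (fun e => e.2) := by
        rcases pvMax2_eq_or curr (pvDv nums l r c.2, -c.2) with h | h
        · rw [h]
          rcases hcur with h' | ⟨v', hv', hnv⟩
          · exact Or.inl h'
          · refine Or.inr ⟨v', hv', ?_⟩
            intro hmem
            exact hnv (by simp [List.mem_cons]; right; simpa using hmem)
        · exact Or.inr ⟨c.2, by rw [h], hc2rest⟩
      by_cases hbr2 : PySem.Int.floordiv (r - l + 1) 2 < (pvMax2 curr (pvDv nums l r c.2, -c.2)).1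
      · rw [if_pos hbr2]
        symm
        apply pvFoldMax_stay
        intro e he
        have hfd : 0 ≤ PySem.Int.floordiv (r - l + 1) 2 := by
          rw [PySem.Int.floordiv_eq_ediv_of_pos (by omega : (0:Int) < 2)]
          exact Int.ediv_nonneg (by omega) (by omega)
        rcases hcur' with h0 | ⟨w, hw, hnw⟩
        · rw [h0] at hbr2; simp at hbr2; omega
        · have hew : e.2 ≠ w := by
            intro hcontra
            exact hnw (hcontra ▸ List.mem_map.mpr ⟨e, he, rfl⟩)
          have hsum := H2 e.2 w hew
          have h2w : r - l + 1 < (pvMax2 curr (pvDv nums l r c.2, -c.2)).1 * 2 := by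
            rw [← PySem.Int.floordiv_lt_iff_lt_mul (by omega : (0:Int) < 2)]
            exact hbr2
          rw [hw] at h2w ⊢
          simp only at h2w ⊢
          omega
      · rw [if_neg hbr2]
        exact ih _ hpw' hnd'
          (fun e he => hde e (List.mem_cons_of_mem _ he)) hcur'

lemma pvScanA_fst_zero (nums : List Int) (l r : Int) :
    ∀ (es : List (Int × Int)) (curr : Int × Int), curr.1 = 0 →
      (∀ e ∈ es, pvDv nums l r e.2 ≤ 0) →
      (pvScanA (pvVals nums) l r es curr).1 = 0 := by
  intro es
  induction es with
  | nil => intro curr h _; exact h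
  | cons c rest ih =>
    intro curr hc hd
    simp only [pvScanA]
    rw [pvVals_getD]
    simp only [show ((PySem.List.bisectRight (pvPos nums c.2) r : Int)
        - (PySem.List.bisectLeft (pvPos nums c.2) l : Int)) = pvDv nums l r c.2 from rfl]
    by_cases hbr : c.1 < curr.1
    · rw [if_pos hbr]; exact hc
    · rw [if_neg hbr]
      have hdc := hd c List.mem_cons_self
      have hcurr' : (pvMax2 curr (pvDv nums l r c.2, -c.2)).1 = 0 := by
        unfold pvMax2; split
        · rename_i hlt; rw [pvLexLt_true_iff] at hlt; simp only at hlt ⊢; omega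
        · exact hc
      by_cases hbr2 : PySem.Int.floordiv (r - l + 1) 2 < (pvMax2 curr (pvDv nums l r c.2, -c.2)).1
      · rw [if_pos hbr2]; exact hcurr'
      · rw [if_neg hbr2]
        exact ih _ hcurr' (fun e he => hd e (List.mem_cons_of_mem _ he))

-- ---------- the B-side counter and best-entry fold ----------

lemma pvCnt_eq_counter (nums : List Int) (l r : Int) :
    (PySem.List.enumerate nums 0).foldl
      (fun c p => if l ≤ p.1 ∧ p.1 ≤ r then c.insert p.2 (c.getD p.2 0 + 1) else c)
      PySem.Dict.empty
    = PySem.Dict.counter (pvWv nums l r) := by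
  rw [← PySem.Dict.foldl_insert_getD_add_one_eq_counter]
  unfold pvWv
  rw [List.foldl_map, List.foldl_filter]
  congr 1
  funext acc p
  by_cases h : l ≤ p.1 ∧ p.1 ≤ r <;> simp [h]

lemma pvBestFold_phi :
    ∀ (items : List (Int × Int)) (b0 : Int × Int),
      items.foldl (fun b p => if b.1 < p.2 ∨ (p.2 = b.1 ∧ p.1 < b.2) then (p.2, p.1) else b) b0
      = (fun x : Int × Int => (x.1, -x.2))
          (items.foldl (fun acc p => pvMax2 acc (p.2, -p.1)) (b0.1, -b0.2)) := by
  intro items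
  induction items with
  | nil => intro b0; simp
  | cons p items ih =>
    intro b0
    simp only [List.foldl_cons]
    by_cases h : b0.1 < p.2 ∨ (p.2 = b0.1 ∧ p.1 < b0.2)
    · rw [if_pos h]
      have hlt : pvLexLt (b0.1, -b0.2) (p.2, -p.1) = true := by
        rw [pvLexLt_true_iff]; simp only; omega
      rw [ih]
      congr 1
      unfold pvMax2; rw [hlt]; simp
    · rw [if_neg h]
      have hlt : pvLexLt (b0.1, -b0.2) (p.2, -p.1) = false := by
        rw [pvLexLt_false_iff]; simp only; push_neg at h; omega
      rw [ih]
      congr 1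
      rw [pvMax2_of_lt_false hlt]

-- ---------- window values ----------

lemma pvWv_count (nums : List Int) (l r v : Int) :
    (((pvWv nums l r).count v : Nat) : Int) = pvWCount nums l r v := by
  unfold pvWv pvWCount
  rw [List.count, List.countP_map, List.countP_filter]
  congr 2
  funext p
  simp only [Function.comp]
  by_cases h1 : l ≤ p.1 ∧ p.1 ≤ r <;> by_cases h2 : p.2 = v <;> simp [h1, h2]

lemma pvWv_mem_iff (nums : List Int) (l r v : Int) :
    v ∈ pvWv nums l r ↔ 1 ≤ pvWCount nums l r v := by
  rw [← pvWv_count]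
  constructor
  · intro h
    have := List.count_pos_iff.mpr h
    omega
  · intro h
    apply List.count_pos_iff.mp
    omega

lemma pvWv_subset (nums : List Int) (l r : Int) : ∀ v ∈ pvWv nums l r, v ∈ nums := by
  intro v hv
  unfold pvWv at hv
  obtain ⟨p, hp, rfl⟩ := List.mem_map.mp hv
  have hmem := List.mem_of_mem_filter hp
  obtain ⟨k, hk, rfl⟩ := (PySem.List.mem_enumerate_iff nums 0 p).mp hmem
  simp only
  exact List.getElem_mem hk

lemma pvWv_nil_iff (nums : List Int) (l r : Int) (hne : nums ≠ []) :
    pvWv nums l r = [] ↔ (r < l ∨ r < 0 ∨ (nums.length : Int) ≤ l) := by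
  constructor
  · intro h
    by_contra hcon
    push_neg at hcon
    obtain ⟨h1, h2, h3⟩ := hcon
    have hn : 0 < nums.length := List.length_pos_iff.mpr hne
    have hkn : (max l 0).toNat < nums.length := by omega
    have hmem : ((0 : Int) + ((max l 0).toNat : Int), nums[(max l 0).toNat]) ∈ PySem.List.enumerate nums 0 := by
      rw [PySem.List.mem_enumerate_iff]
      exact ⟨(max l 0).toNat, hkn, rfl⟩
    have : nums[(max l 0).toNat] ∈ pvWv nums l r := by
      unfold pvWv
      apply List.mem_map.mpr
      refine ⟨((0 : Int) + ((max l 0).toNat : Int), nums[(max l 0).toNat]), ?_, rfl⟩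
      apply List.mem_filter.mpr
      refine ⟨hmem, ?_⟩
      simp only [decide_eq_true_eq]
      omega
    rw [h] at this
    exact absurd this (List.not_mem_nil)
  · intro h
    rw [List.eq_nil_iff_forall_not_mem]
    intro v hv
    unfold pvWv at hv
    obtain ⟨p, hp, rfl⟩ := List.mem_map.mp hv
    have hmem := List.mem_of_mem_filter hp
    have hrange := (List.mem_filter.mp hp).2
    obtain ⟨k, hk, rfl⟩ := (PySem.List.mem_enumerate_iff nums 0 p).mp hmem
    simp only [decide_eq_true_eq] at hrange
    omega

-- sum of window counts of two distinct values is at most the raw window width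
lemma pvWCount_pair_le (nums : List Int) (l r : Int) (hlr : l ≤ r + 1) :
    ∀ u w : Int, u ≠ w → pvWCount nums l r u + pvWCount nums l r w ≤ r - l + 1 := by
  intro u w huw
  have hsum : ∀ (L : List (Int × Int)),
      L.countP (fun p => decide (l ≤ p.1 ∧ p.1 ≤ r ∧ p.2 = u))
      + L.countP (fun p => decide (l ≤ p.1 ∧ p.1 ≤ r ∧ p.2 = w))
      ≤ L.countP (fun p => decide (l ≤ p.1 ∧ p.1 ≤ r)) := by
    intro L
    induction L with
    | nil => simp
    | cons p L ihL =>
      simp only [List.countP_cons]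
      have k1 : (if decide (l ≤ p.1 ∧ p.1 ≤ r ∧ p.2 = u) = true then 1 else 0)
          + (if decide (l ≤ p.1 ∧ p.1 ≤ r ∧ p.2 = w) = true then 1 else 0)
          ≤ (if decide (l ≤ p.1 ∧ p.1 ≤ r) = true then 1 else 0) := by
        rcases Classical.em (l ≤ p.1 ∧ p.1 ≤ r) with h3 | h3
        · rcases Classical.em (p.2 = u) with hu | hu <;> rcases Classical.em (p.2 = w) with hw | hw
          · exact absurd (hu.symm.trans hw) huw
          · simp only [h3.1, h3.2, hu]
            simp [hw]
            exact huw
          · simp only [h3.1, h3.2, hw]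
            simp [hu]
            exact huw.symm
          · simp [h3.1, h3.2, hu, hw]
        · have n1 : ¬(l ≤ p.1 ∧ p.1 ≤ r ∧ p.2 = u) := fun hh => h3 ⟨hh.1, hh.2.1⟩
          have n2 : ¬(l ≤ p.1 ∧ p.1 ≤ r ∧ p.2 = w) := fun hh => h3 ⟨hh.1, hh.2.1⟩
          simp [n1, n2, h3]
      omega
  have hwidth : ((PySem.List.enumerate nums 0).countP (fun p => decide (l ≤ p.1 ∧ p.1 ≤ r)) : Int)
      ≤ r - l + 1 := by
    have hpwf : ((PySem.List.enumerate nums 0).filter (fun p => decide (l ≤ p.1 ∧ p.1 ≤ r))).Pairwise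
        (fun p q : Int × Int => p.1 < q.1) := (PySem.List.pairwise_lt_enumerate nums 0).filter _
    have hnd : (((PySem.List.enumerate nums 0).filter
        (fun p => decide (l ≤ p.1 ∧ p.1 ≤ r))).map (fun p => p.1)).Nodup := by
      exact ((List.Pairwise.map (fun p : Int × Int => p.1) (S := (· < ·)) (fun a b h => h) hpwf).imp (fun h => ne_of_lt h))
    have hsub : (((PySem.List.enumerate nums 0).filter
        (fun p => decide (l ≤ p.1 ∧ p.1 ≤ r))).map (fun p => p.1)) ⊆ PySem.List.pyRange l (r + 1) 1 := by
      intro y hy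
      obtain ⟨p, hp, rfl⟩ := List.mem_map.mp hy
      have h2 := (List.mem_filter.mp hp).2
      simp only [decide_eq_true_eq] at h2
      rw [PySem.List.mem_pyRange_one]
      omega
    have hsp := (List.Nodup.subperm hnd hsub).length_le
    rw [List.length_map] at hsp
    rw [PySem.List.length_pyRange_one] at hsp
    rw [← List.countP_eq_length_filter] at hsp
    omega
  have h1 := hsum (PySem.List.enumerate nums 0)
  unfold pvWCount
  have h1' : ((PySem.List.enumerate nums 0).countP (fun p => decide (l ≤ p.1 ∧ p.1 ≤ r ∧ p.2 = u)) : Int)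
      + ((PySem.List.enumerate nums 0).countP (fun p => decide (l ≤ p.1 ∧ p.1 ≤ r ∧ p.2 = w)) : Int)
      ≤ ((PySem.List.enumerate nums 0).countP (fun p => decide (l ≤ p.1 ∧ p.1 ≤ r)) : Int) := by
    exact_mod_cast h1
  omega

-- the window values are exactly the take/drop slice used by D_subarrayMajority
lemma pvEnumFilter_slice :
    ∀ (xs : List Int) (s a b : Int),
      ((PySem.List.enumerate xs s).filter (fun p => decide (a ≤ p.1 ∧ p.1 ≤ b))).map (fun p => p.2)
        = (xs.take (b - s + 1).toNat).drop (a - s).toNat := by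
  intro xs
  induction xs with
  | nil => intro s a b; simp [PySem.List.enumerate_nil]
  | cons x xs ih =>
    intro s a b
    rw [PySem.List.enumerate_cons]
    by_cases hin : a ≤ s ∧ s ≤ b
    · rw [List.filter_cons_of_pos (by simpa using hin)]
      simp only [List.map_cons]
      rw [ih (s+1) a b]
      have e1 : (a - s).toNat = 0 := by omega
      have e2 : (b - s + 1).toNat = (b - (s+1) + 1).toNat + 1 := by omega
      have e3 : (a - (s+1)).toNat = 0 := by omega
      rw [e1, e2, e3, List.take_succ_cons, List.drop_zero, List.drop_zero]
    · rw [List.filter_cons_of_neg (by simpa using hin)]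
      rw [ih (s+1) a b]
      push_neg at hin
      by_cases hs : s < a
      · have e2 : (a - s).toNat = (a - (s+1)).toNat + 1 := by omega
        by_cases hb : b - s + 1 ≤ 0
        · have e4 : (b - s + 1).toNat = 0 := by omega
          have e5 : (b - (s+1) + 1).toNat = 0 := by omega
          rw [e4, e5]
          simp
        · have e4 : (b - s + 1).toNat = (b - (s+1) + 1).toNat + 1 := by omega
          rw [e2, e4, List.take_succ_cons, List.drop_succ_cons]
      · have hbs : b < s := hin (by omega)
        have e4 : (b - s + 1).toNat = 0 := by omega
        have e5 : (b - (s+1) + 1).toNat = 0 := by omega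
        rw [e4, e5]
        simp

lemma pvWv_eq_slice (nums : List Int) (l r : Int) :
    pvWv nums l r = (nums.take (r + 1).toNat).drop l.toNat := by
  have h := pvEnumFilter_slice nums 0 l r
  unfold pvWv
  simpa using h

-- ---------- the per-query equivalence ----------

lemma pvAns_eq (nums : List Int) (l r th : Int)
    (hD : ¬ ((th ≤ 0 ∧ pvWv nums l r = []) ∨
        (∃ v ∈ nums, v ≤ -2 ∧ nums.count v = th.toNat ∧ (pvWv nums l r).count v = th.toNat))) :
    pvAnsA (pvVals nums) (pvCand nums) [l, r, th] = pvAnsB nums [l, r, th] := by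
  have hA : pvAnsA (pvVals nums) (pvCand nums) [l, r, th]
      = (if (pvCand nums).length ≤ pvBisectPair (pvCand nums) (th, -1) then -1
         else (if th ≤ (pvScanA (pvVals nums) l r
                  (((pvCand nums).drop (pvBisectPair (pvCand nums) (th, -1))).reverse) (0, 0)).1
               then -(pvScanA (pvVals nums) l r
                  (((pvCand nums).drop (pvBisectPair (pvCand nums) (th, -1))).reverse) (0, 0)).2
               else -1)) := rfl
  have hB : pvAnsB nums [l, r, th]
      = (if th ≤ (((PySem.Set.ofList (pvWv nums l r)).map
              (fun k => (k, ((pvWv nums l r).count k : Int)))).foldl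
              (fun acc p => pvMax2 acc (p.2, -p.1)) ((0 : Int), (1 : Int))).1
         then -(((PySem.Set.ofList (pvWv nums l r)).map
              (fun k => (k, ((pvWv nums l r).count k : Int)))).foldl
              (fun acc p => pvMax2 acc (p.2, -p.1)) ((0 : Int), (1 : Int))).2
         else -1) := by
    simp only [pvAnsB]
    rw [pvCnt_eq_counter nums l r, PySem.Dict.items_counter, pvBestFold_phi]
    norm_num
  set x := pvBisectPair (pvCand nums) (th, -1) with hx
  set M := pvScanA (pvVals nums) l r (((pvCand nums).drop x).reverse) (0, 0) with hMdef
  set items : List (Int × Int) :=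
    (PySem.Set.ofList (pvWv nums l r)).map (fun k => (k, ((pvWv nums l r).count k : Int))) with hitems
  set N : Int × Int := items.foldl (fun acc p => pvMax2 acc (p.2, -p.1)) ((0 : Int), (1 : Int)) with hNdef
  have hitem : ∀ p ∈ items, ∃ v, v ∈ pvWv nums l r ∧ p = (v, pvWCount nums l r v) := by
    intro p hp
    rw [hitems] at hp
    obtain ⟨v, hv, rfl⟩ := List.mem_map.mp hp
    exact ⟨v, (PySem.Set.mem_ofList _ _).mp hv, by rw [pvWv_count]⟩
  have hitem' : ∀ v ∈ pvWv nums l r, (v, pvWCount nums l r v) ∈ items := by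
    intro v hv
    rw [hitems]
    refine List.mem_map.mpr ⟨v, (PySem.Set.mem_ofList _ _).mpr hv, ?_⟩
    rw [pvWv_count]
  obtain ⟨hNmem, -, hNub⟩ :=
    pvFoldMax_char (fun p : Int × Int => (p.2, -p.1)) items ((0 : Int), (1 : Int))
  rw [← hNdef] at hNmem hNub
  have hNshape : N = ((0:Int), (1:Int)) ∨ ∃ v, v ∈ pvWv nums l r ∧ N = (pvWCount nums l r v, -v) := by
    rcases hNmem with h | ⟨p, hp, h⟩
    · exact Or.inl h
    · obtain ⟨v, hv, rfl⟩ := hitem p hp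
      exact Or.inr ⟨v, hv, h⟩
  have hNall : ∀ v ∈ pvWv nums l r, pvLexLt N (pvWCount nums l r v, -v) = false := by
    intro v hv
    have := hNub _ (hitem' v hv)
    simpa using this
  have hwc0 : ∀ u, u ∉ pvWv nums l r → pvWCount nums l r u = 0 := by
    intro u hu
    have h1 := pvWCount_nonneg nums l r u
    have h2 : ¬ (1 ≤ pvWCount nums l r u) := fun h => hu ((pvWv_mem_iff nums l r u).mpr h)
    omega
  by_cases hnil : nums = []
  · subst hnil
    have hcand : pvCand [] = [] := rfl
    have hitems0 : items = [] := by rw [hitems]; rfl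
    have hN0 : N = ((0:Int), (1:Int)) := by rw [hNdef, hitems0]; rfl
    rw [hA, hB, hN0]
    rw [if_pos (by rw [hcand]; simp [hx, hcand])]
    simp
  · by_cases hlr : l ≤ r + 1
    · -- main case
      have hH2 : ∀ u w : Int, u ≠ w → pvDv nums l r u + pvDv nums l r w ≤ r - l + 1 := by
        intro u w h
        rw [pvDv_eq_wc nums l r u hlr, pvDv_eq_wc nums l r w hlr]
        exact pvWCount_pair_le nums l r hlr u w h
      have hpwes : (((pvCand nums).drop x).reverse).Pairwise (fun a b => b.1 ≤ a.1) := by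
        rw [List.pairwise_reverse]
        apply List.Pairwise.imp ?_ ((pvCand_pairwise nums).drop)
        intro a b hab
        rw [pvLexLt_false_iff] at hab
        omega
      have hndes : ((((pvCand nums).drop x).reverse).map (fun e => e.2)).Nodup := by
        rw [List.map_reverse, List.nodup_reverse, List.map_drop]
        exact (pvCand_vals_nodup nums).sublist (List.drop_sublist _ _)
      have hdees : ∀ e ∈ (((pvCand nums).drop x).reverse), pvDv nums l r e.2 ≤ e.1 ∧ 0 ≤ e.1 := by
        intro e he
        have hec : e ∈ pvCand nums := List.mem_of_mem_drop (List.mem_reverse.mp he)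
        obtain ⟨v, hv, rfl⟩ := (pvMem_cand nums e).mp hec
        constructor
        · rw [pvDv_eq_wc nums l r _ hlr]
          simpa using pvWCount_le_tot nums l r v
        · simp only [pvTot]
          exact Int.natCast_nonneg _
      have hscan : M = (((pvCand nums).drop x).reverse).foldl
          (fun acc e => pvMax2 acc (pvDv nums l r e.2, -e.2)) (0, 0) := by
        rw [hMdef]
        exact pvScanA_eq_foldl nums l r hlr hH2 _ _ hpwes hndes hdees (Or.inl rfl)
      obtain ⟨hMmem, -, hMub⟩ :=
        pvFoldMax_char (fun e : Int × Int => (pvDv nums l r e.2, -e.2))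
          (((pvCand nums).drop x).reverse) ((0:Int), (0:Int))
      rw [← hscan] at hMmem hMub
      have hMshape : M = ((0:Int), (0:Int)) ∨ ∃ u, u ∈ nums ∧ M = (pvWCount nums l r u, -u) := by
        rcases hMmem with h | ⟨e, he, h⟩
        · exact Or.inl h
        · have hec : e ∈ pvCand nums := List.mem_of_mem_drop (List.mem_reverse.mp he)
          obtain ⟨v, hvn, rfl⟩ := (pvMem_cand nums e).mp hec
          refine Or.inr ⟨v, hvn, ?_⟩
          rw [h]
          simp only
          rw [pvDv_eq_wc nums l r v hlr]
      have hwin : ∀ w, w ∈ pvWv nums l r → th ≤ pvWCount nums l r w →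
          pvLexLt (pvTot nums w, w) (th, -1) = false := by
        intro w hwW hthw
        cases hc : pvLexLt (pvTot nums w, w) (th, -1)
        · rfl
        · exfalso
          rw [pvLexLt_true_iff] at hc
          simp only at hc
          have h1 := pvWCount_le_tot nums l r w
          have h2 : 1 ≤ pvWCount nums l r w := (pvWv_mem_iff nums l r w).mp hwW
          have htot : (nums.count w : Int) = pvTot nums w := rfl
          have hwc := pvWv_count nums l r w
          exact hD (Or.inr ⟨w, pvWv_subset nums l r w hwW, by omega, by omega, by omega⟩)
      have hNge : ∀ w, w ∈ pvWv nums l r → N = (pvWCount nums l r w, -w) →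
          ∀ u ∈ nums, pvLexLt (pvWCount nums l r w, -w) (pvWCount nums l r u, -u) = false := by
        intro w hw hNw u hu
        by_cases huW : u ∈ pvWv nums l r
        · rw [← hNw]; exact hNall u huW
        · have h0 := hwc0 u huW
          have h2 : 1 ≤ pvWCount nums l r w := (pvWv_mem_iff nums l r w).mp hw
          rw [pvLexLt_false_iff]
          simp only
          omega
      rw [hA, hB]
      rcases hNshape with hN0 | ⟨w, hwW, hNw⟩
      · -- window is empty
        have hWnil : pvWv nums l r = [] := by
          rcases h : pvWv nums l r with _ | ⟨v, t⟩
          · rfl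
          · exfalso
            have hv : v ∈ pvWv nums l r := by rw [h]; exact List.mem_cons_self
            have h2 := hNall v hv
            rw [hN0, pvLexLt_false_iff] at h2
            simp only at h2
            have := (pvWv_mem_iff nums l r v).mp hv
            omega
        have hth1 : (1:Int) ≤ th := by
          by_contra hth
          push_neg at hth
          exact hD (Or.inl ⟨by omega, hWnil⟩)
        rw [hN0]
        have hBv : (if th ≤ (((0:Int), (1:Int)) : Int × Int).1
            then -(((0:Int), (1:Int)) : Int × Int).2 else (-1:Int)) = -1 := by
          rw [if_neg (by simp only; omega)]
        rw [hBv]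
        by_cases hxlen : (pvCand nums).length ≤ x
        · rw [if_pos hxlen]
        · rw [if_neg hxlen]
          rcases hMshape with hM0 | ⟨u, hu, hMu⟩
          · rw [hM0, if_neg (by simp only; omega)]
          · have h0 : pvWCount nums l r u = 0 := hwc0 u (by rw [hWnil]; simp)
            rw [hMu, h0, if_neg (by simp only; omega)]
      · -- N = (wc w, -w): the window winner is w
        have hw1 : 1 ≤ pvWCount nums l r w := (pvWv_mem_iff nums l r w).mp hwW
        have hmax := hNge w hwW hNw
        rw [hNw]
        by_cases hxlen : (pvCand nums).length ≤ x
        · rw [if_pos hxlen]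
          have hall : ∀ e ∈ pvCand nums, pvLexLt e (th, -1) = true := by
            have hx' : x = (pvCand nums).countP (fun e => pvLexLt e (th, -1)) := hx
            have hle := List.countP_le_length (p := fun e => pvLexLt e (th, -1)) (l := pvCand nums)
            have hxx : (pvCand nums).countP (fun e => pvLexLt e (th, -1)) = (pvCand nums).length := by
              omega
            intro e he
            exact List.countP_eq_length.mp hxx e he
          have hnth : ¬ th ≤ pvWCount nums l r w := by
            intro hth
            have hkey := hwin w hwW hth
            have hmem : (pvTot nums w, w) ∈ pvCand nums :=
              (pvMem_cand nums _).mpr ⟨w, pvWv_subset nums l r w hwW, rfl⟩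
            rw [hall _ hmem] at hkey
            exact absurd hkey (by simp)
          rw [if_neg (by simpa using hnth)]
        · rw [if_neg hxlen]
          by_cases hth : th ≤ pvWCount nums l r w
          · have hkey : pvLexLt (pvTot nums w, w) (th, -1) = false := hwin w hwW hth
            have hmem : (pvTot nums w, w) ∈ pvCand nums :=
              (pvMem_cand nums _).mpr ⟨w, pvWv_subset nums l r w hwW, rfl⟩
            have hdrop : (pvTot nums w, w) ∈ (pvCand nums).drop x :=
              pvMem_drop_of_not_lt (th, -1) (pvCand nums) (pvCand_pairwise nums) _ hmem hkey
            have hines : (pvTot nums w, w) ∈ ((pvCand nums).drop x).reverse :=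
              List.mem_reverse.mpr hdrop
            have h1 : pvLexLt M (pvWCount nums l r w, -w) = false := by
              have := hMub _ hines
              simp only at this
              rwa [pvDv_eq_wc nums l r w hlr] at this
            have h2 : pvLexLt (pvWCount nums l r w, -w) M = false := by
              rcases hMshape with hM0 | ⟨u, hu, hMu⟩
              · rw [hM0, pvLexLt_false_iff]
                simp only
                omega
              · rw [hMu]; exact hmax u hu
            have hMN : M = (pvWCount nums l r w, -w) := pvLex_antisymm h1 h2
            rw [hMN, if_pos (by simpa using hth)]
          · have hMlt : ¬ th ≤ M.1 := by
              rcases hMshape with hM0 | ⟨u, hu, hMu⟩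
              · rw [hM0]; simp only; omega
              · rw [hMu]; simp only
                have := hmax u hu
                rw [pvLexLt_false_iff] at this
                simp only at this
                omega
            rw [if_neg hMlt, if_neg (by simpa using hth)]
    · -- r + 1 < l: the window is empty whatever nums is
      push_neg at hlr
      have hW : pvWv nums l r = [] := (pvWv_nil_iff nums l r hnil).mpr (Or.inl (by omega))
      have hth1 : (1:Int) ≤ th := by
        by_contra hth
        push_neg at hth
        exact hD (Or.inl ⟨by omega, hW⟩)
      have hitems0 : items = [] := by
        rw [hitems, hW]; rfl
      have hN0 : N = ((0:Int), (1:Int)) := by rw [hNdef, hitems0]; rfl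
      rw [hA, hB, hN0]
      have hBv : (if th ≤ (((0:Int), (1:Int)) : Int × Int).1
          then -(((0:Int), (1:Int)) : Int × Int).2 else (-1:Int)) = -1 := by
        rw [if_neg (by simp only; omega)]
      rw [hBv]
      by_cases hxlen : (pvCand nums).length ≤ x
      · rw [if_pos hxlen]
      · rw [if_neg hxlen]
        have hM0 : M.1 = 0 := by
          rw [hMdef]
          apply pvScanA_fst_zero nums l r _ _ rfl
          intro e he
          exact pvDv_nonpos nums l r e.2 hlr
        rw [if_neg (by omega)]

-- ---------- assembling the lists ----------

lemma pvA_eq_map (nums : List Int) (queries : List (List Int)) :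
    subarrayMajority nums queries = queries.map (pvAnsA (pvVals nums) (pvCand nums)) := by
  unfold subarrayMajority
  simpa using PySem.List.foldl_append_singleton_eq_map (pvAnsA (pvVals nums) (pvCand nums)) queries []

lemma pvB_eq_map (nums : List Int) (queries : List (List Int)) :
    subarrayMajority_alt nums queries = queries.map (pvAnsB nums) := by
  unfold subarrayMajority_alt
  simpa using PySem.List.foldl_append_singleton_eq_map (pvAnsB nums) queries []

-- ===== VERDICT (by name: the statement is the Claim_ definition above) =====

theorem subarrayMajority_spec : Claim_unchanged_subarrayMajority := by
  intro nums queries _hdom hpre hD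
  rw [pvA_eq_map, pvB_eq_map]
  apply List.map_congr_left
  intro q hq
  have hlen := hpre q hq
  match q, hlen with
  | [l, r, th], _ =>
    apply pvAns_eq
    intro hbody
    apply hD
    refine ⟨[l, r, th], hq, ?_⟩
    have hsl : pvWv nums l r = (nums.take (r + 1).toNat).drop l.toNat := pvWv_eq_slice nums l r
    simp only [List.getD_cons_zero, List.getD_cons_succ]
    rcases hbody with ⟨h1, h2⟩ | ⟨v, hv, h1, h2, h3⟩
    · exact Or.inl ⟨h1, by rw [← hsl]; exact h2⟩
    · exact Or.inr ⟨v, hv, h1, h2, by rw [← hsl]; exact h3⟩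

theorem subarrayMajority_changed : Claim_changed_subarrayMajority := by
  unfold Claim_changed_subarrayMajority; decide
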